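-- pv_equiv track=rewrite | github.com/megascienta/sciona | src/sciona/pipelines/diff_overlay/patch.py | _match_module_name
-- ===== SOURCE A (Python) =====
-- def _match_module_name(qualified_name: str, module_names: list[str]) -> str | None:
--     if not qualified_name or not module_names:
--         return None
--     best = None
--     best_len = -1
--     q_parts = qualified_name.split(".")
--     for name in module_names:
--         n_parts = name.split(".")
--         if len(n_parts) > len(q_parts):
--             continue
--         for idx in range(len(q_parts) - len(n_parts) + 1):
--             if q_parts[idx : idx + len(n_parts)] == n_parts:
--                 if len(n_parts) > best_len:
--                     best = name
--                     best_len = len(n_parts)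
--                 break
--     return best
-- ===== SOURCE B (Python) =====
-- def _match_module_name(qualified_name: str, module_names: list[str]) -> str | None:
--     if not qualified_name or not module_names:
--         return None
--     q_parts = qualified_name.split(".")
--     # Phase 1: index every contiguous token window of the qualified name.
--     windows = set()
--     for i in range(len(q_parts) + 1):
--         for j in range(i, len(q_parts) + 1):
--             windows.add(tuple(q_parts[i:j]))
--     # Phase 2: one lookup per candidate; earliest longest candidate wins.
--     best = None
--     best_len = -1
--     for name in module_names:
--         n_parts = tuple(name.split("."))
--         if n_parts in windows and len(n_parts) > best_len:
--             best = name
--             best_len = len(n_parts)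
--     return best
-- ===== Notes on version B (the rewrite author's own statement) =====
-- stated objective: faster
-- what changed: B pre-builds a hash-set of all contiguous token windows of the qualified name in a separate first pass, then replaces A's per-candidate inner window scan by a single set-membership lookup (earliest longest candidate kept via strict '>').
import Mathlib
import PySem

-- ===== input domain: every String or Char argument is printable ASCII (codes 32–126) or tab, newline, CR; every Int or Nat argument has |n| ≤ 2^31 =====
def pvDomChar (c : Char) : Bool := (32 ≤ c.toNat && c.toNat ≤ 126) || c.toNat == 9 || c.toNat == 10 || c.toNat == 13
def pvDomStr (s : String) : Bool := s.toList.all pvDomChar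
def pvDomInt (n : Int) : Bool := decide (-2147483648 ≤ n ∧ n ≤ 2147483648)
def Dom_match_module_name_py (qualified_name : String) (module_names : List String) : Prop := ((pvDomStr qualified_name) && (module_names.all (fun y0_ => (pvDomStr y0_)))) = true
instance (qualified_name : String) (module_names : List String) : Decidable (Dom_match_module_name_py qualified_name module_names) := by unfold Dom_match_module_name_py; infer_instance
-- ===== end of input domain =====

-- B indexes all contiguous token windows of the qualified name in a first pass and
-- replaces A's per-candidate inner window scan by a single set-membership lookup.


-- shared primitive: Python's s.split(".") for the literal non-empty separator "."
-- (exactly PySem.Str.split? with sep = ".", which never returns none for a non-empty sep)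
def pySplitDot (s : String) : List String := (PySem.Chars.splitOn s.toList ['.']).map String.ofList

-- ===== PORT A =====
-- inner 'for idx in range(...)' loop of A, with its break at the first matching window
def pvInnerA (q n : List String) (name : String) (st : Option String × Int) : List Int → Option String × Int
  | [] => st
  | idx :: rest =>
    if PySem.List.slice q (some idx) (some (idx + (n.length : Int))) = n then
      (if (n.length : Int) > st.2 then (some name, (n.length : Int)) else st)
    else pvInnerA q n name st rest

def match_module_name_py (qualified_name : String) (module_names : List String) : Option String :=
  if qualified_name = "" ∨ module_names = [] then none
  else
    let q_parts := pySplitDot qualified_name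
    (module_names.foldl (fun st name =>
      let n_parts := pySplitDot name
      if n_parts.length > q_parts.length then st
      else pvInnerA q_parts n_parts name st
        (PySem.List.pyRange 0 ((q_parts.length : Int) - (n_parts.length : Int) + 1) 1))
      ((none : Option String), (-1 : Int))).1

-- ===== PORT B =====
-- Phase 1 of B: the set of all contiguous token windows q_parts[i:j]
def pvWindows (q_parts : List String) : PySem.Set (List String) :=
  (PySem.List.pyRange 0 ((q_parts.length : Int) + 1) 1).foldl (fun s i =>
    (PySem.List.pyRange i ((q_parts.length : Int) + 1) 1).foldl (fun s j =>
      PySem.Set.add s (PySem.List.slice q_parts (some i) (some j))) s)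
    PySem.Set.empty

def match_module_name_py_alt (qualified_name : String) (module_names : List String) : Option String :=
  if qualified_name = "" ∨ module_names = [] then none
  else
    let q_parts := pySplitDot qualified_name
    let windows := pvWindows q_parts
    (module_names.foldl (fun st name =>
      let n_parts := pySplitDot name
      if PySem.Set.contains windows n_parts && decide ((n_parts.length : Int) > st.2) then
        (some name, (n_parts.length : Int))
      else st)
      ((none : Option String), (-1 : Int))).1

-- ===== PRECONDITION & SPEC =====
def Spec_match_module_name_py (qualified_name : String) (module_names : List String) (out : Option String) : Prop := out = match_module_name_py_alt qualified_name module_names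
instance (qualified_name : String) (module_names : List String) (out : Option String) : Decidable (Spec_match_module_name_py qualified_name module_names out) := by unfold Spec_match_module_name_py; infer_instance

-- ===== CLAIM (what is proved, stated in full; the proofs are below) =====
def Claim_equal_match_module_name_py : Prop := ∀ (qualified_name : String) (module_names : List String), Dom_match_module_name_py qualified_name module_names → Spec_match_module_name_py qualified_name module_names (match_module_name_py qualified_name module_names)

-- ===== LEMMAS AND PROOFS =====

-- membership in a nested add-loop
theorem pv_mem_nested_foldl_add {α β : Type} [BEq α] [LawfulBEq α]
    (l : List β) (g : β → List β) (f : β → β → α) (s : PySem.Set α) (y : α) :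
    y ∈ l.foldl (fun s i => (g i).foldl (fun s j => PySem.Set.add s (f i j)) s) s ↔
      y ∈ s ∨ ∃ i ∈ l, ∃ j ∈ g i, y = f i j := by
  induction l generalizing s with
  | nil => simp
  | cons a t ih =>
    simp only [List.foldl_cons, ih, PySem.Set.mem_foldl_add, List.mem_cons]
    constructor
    · rintro (( h | ⟨j, hj, rfl⟩) | ⟨i, hi, j, hj, rfl⟩)
      · exact Or.inl h
      · exact Or.inr ⟨a, Or.inl rfl, j, hj, rfl⟩
      · exact Or.inr ⟨i, Or.inr hi, j, hj, rfl⟩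
    · rintro (h | ⟨i, (rfl | hi), j, hj, rfl⟩)
      · exact Or.inl (Or.inl h)
      · exact Or.inl (Or.inr ⟨j, hj, rfl⟩)
      · exact Or.inr ⟨i, hi, j, hj, rfl⟩

theorem pv_mem_windows (q : List String) (y : List String) :
    y ∈ pvWindows q ↔ ∃ i j : Int, 0 ≤ i ∧ i ≤ j ∧ j ≤ (q.length : Int) ∧
      y = PySem.List.slice q (some i) (some j) := by
  unfold pvWindows
  rw [pv_mem_nested_foldl_add]
  simp only [PySem.List.mem_pyRange_one, PySem.Set.empty]
  constructor
  · rintro (h | ⟨i, ⟨hi0, _⟩, j, ⟨hij, hj⟩, rfl⟩)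
    · simp at h
    · exact ⟨i, j, hi0, hij, by omega, rfl⟩
  · rintro ⟨i, j, hi0, hij, hj, rfl⟩
    exact Or.inr ⟨i, ⟨hi0, by omega⟩, j, ⟨hij, by omega⟩, rfl⟩

-- characterisation of A's inner loop: result depends only on WHETHER some window matches
theorem pv_innerA_eq (q n : List String) (name : String) (st : Option String × Int)
    (l : List Int) :
    pvInnerA q n name st l =
      if ∃ idx ∈ l, PySem.List.slice q (some idx) (some (idx + (n.length : Int))) = n then
        (if (n.length : Int) > st.2 then (some name, (n.length : Int)) else st)
      else st := by
  induction l with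
  | nil => simp [pvInnerA]
  | cons a t ih =>
    by_cases h : PySem.List.slice q (some a) (some (a + (n.length : Int))) = n
    · have hex : ∃ idx ∈ a :: t,
          PySem.List.slice q (some idx) (some (idx + (n.length : Int))) = n :=
        ⟨a, List.mem_cons_self, h⟩
      rw [if_pos hex]
      simp [pvInnerA, h]
    · have hstep : pvInnerA q n name st (a :: t) = pvInnerA q n name st t := by
        simp [pvInnerA, h]
      rw [hstep, ih]
      by_cases ht : ∃ idx ∈ t,
          PySem.List.slice q (some idx) (some (idx + (n.length : Int))) = n
      · obtain ⟨i, hm, he⟩ := ht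
        have h1 : ∃ idx ∈ t,
            PySem.List.slice q (some idx) (some (idx + (n.length : Int))) = n := ⟨i, hm, he⟩
        have h2 : ∃ idx ∈ a :: t,
            PySem.List.slice q (some idx) (some (idx + (n.length : Int))) = n :=
          ⟨i, List.mem_cons_of_mem _ hm, he⟩
        rw [if_pos h1, if_pos h2]
      · have h2 : ¬ ∃ idx ∈ a :: t,
            PySem.List.slice q (some idx) (some (idx + (n.length : Int))) = n := by
          rintro ⟨i, hm, he⟩
          rcases List.mem_cons.mp hm with rfl | hm'
          · exact h he
          · exact ht ⟨i, hm', he⟩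
        rw [if_neg ht, if_neg h2]

-- a matching window has exactly n.length tokens
theorem pv_window_len (q n : List String) (i j : Int) (hi0 : 0 ≤ i) (hij : i ≤ j)
    (hj : j ≤ (q.length : Int)) (h : n = PySem.List.slice q (some i) (some j)) :
    (n.length : Int) = j - i := by
  subst h
  rw [PySem.List.slice_toNat q hi0 (by omega)]
  simp only [List.length_take, List.length_drop]
  omega

-- the two membership tests agree (given k ≤ |q| for A's range form)
theorem pv_exists_iff_mem_windows (q n : List String) (_hk : (n.length : Int) ≤ (q.length : Int)) :
    (∃ idx ∈ PySem.List.pyRange 0 ((q.length : Int) - (n.length : Int) + 1) 1,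
        PySem.List.slice q (some idx) (some (idx + (n.length : Int))) = n) ↔
      n ∈ pvWindows q := by
  rw [pv_mem_windows]
  constructor
  · rintro ⟨idx, hm, he⟩
    rw [PySem.List.mem_pyRange_one] at hm
    exact ⟨idx, idx + (n.length : Int), hm.1, by omega, by omega, he.symm⟩
  · rintro ⟨i, j, hi0, hij, hj, he⟩
    have hlen := pv_window_len q n i j hi0 hij hj he
    refine ⟨i, ?_, ?_⟩
    · rw [PySem.List.mem_pyRange_one]; omega
    · rw [show i + (n.length : Int) = j by omega]; exact he.symm

-- if |n| > |q| no window matches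
theorem pv_not_mem_windows (q n : List String) (_hk : (q.length : Int) < (n.length : Int)) :
    n ∉ pvWindows q := by
  rw [pv_mem_windows]
  rintro ⟨i, j, hi0, hij, hj, he⟩
  have := pv_window_len q n i j hi0 hij hj he
  omega

-- per-name step functions of the two folds agree
theorem pv_step_eq (q : List String) (st : Option String × Int) (name : String) :
    (let n := pySplitDot name
     if n.length > q.length then st
     else pvInnerA q n name st
       (PySem.List.pyRange 0 ((q.length : Int) - (n.length : Int) + 1) 1)) =
    (let n := pySplitDot name
     if PySem.Set.contains (pvWindows q) n && decide ((n.length : Int) > st.2) then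
       (some name, (n.length : Int))
     else st) := by
  simp only []
  set n := pySplitDot name with hn
  by_cases hk : n.length > q.length
  · have hnm : PySem.Set.contains (pvWindows q) n = false := by
      rcases hcon : PySem.Set.contains (pvWindows q) n with _ | _
      · rfl
      · exact absurd ((PySem.Set.contains_iff _ _).mp hcon)
          (pv_not_mem_windows q n (by exact_mod_cast hk))
    rw [if_pos hk, hnm]
    simp
  · rw [if_neg hk, pv_innerA_eq]
    by_cases hmem : n ∈ pvWindows q
    · have hex := (pv_exists_iff_mem_windows q n (by omega)).mpr hmem
      rw [if_pos hex, (PySem.Set.contains_iff _ _).mpr hmem]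
      by_cases hgt : (n.length : Int) > st.2
      · rw [if_pos hgt]; simp [hgt]
      · rw [if_neg hgt]; simp [hgt]
    · have hnex : ¬ ∃ idx ∈ PySem.List.pyRange 0 ((q.length : Int) - (n.length : Int) + 1) 1,
          PySem.List.slice q (some idx) (some (idx + (n.length : Int))) = n := fun hx =>
        hmem ((pv_exists_iff_mem_windows q n (by omega)).mp hx)
      have hnm : PySem.Set.contains (pvWindows q) n = false := by
        rcases hcon : PySem.Set.contains (pvWindows q) n with _ | _
        · rfl
        · exact absurd ((PySem.Set.contains_iff _ _).mp hcon) hmem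
      rw [if_neg hnex, hnm]
      simp

-- ===== VERDICT (by name: the statement is the Claim_ definition above) =====
theorem match_module_name_py_spec : Claim_equal_match_module_name_py := by
  intro qualified_name module_names _
  unfold Spec_match_module_name_py match_module_name_py match_module_name_py_alt
  by_cases hg : qualified_name = "" ∨ module_names = []
  · rw [if_pos hg, if_pos hg]
  · rw [if_neg hg, if_neg hg]
    simp only []
    congr 1
    apply List.foldl_ext
    intro st name _
    exact pv_step_eq (pySplitDot qualified_name) st name
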